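-- pv_equiv track=rewrite | github.com/nhhai196/Ticket-Reassignment | iterativerounding.py | partitionmatrix
-- ===== SOURCE A (Python) =====
-- def partitionmatrix(A, iind):
-- 	if len(A) == 0:
-- 		return [], []
-- 	numrow = len(A)
-- 	numcol = len(A[0])
--
-- 	Aint = []
-- 	Afrac = []
-- 	for i in range(numrow):
-- 		aint = []
-- 		afrac =[]
-- 		for j in range(numcol):
-- 			if j in iind:
-- 				aint.append(A[i][j])
-- 			else:
-- 				afrac.append(A[i][j])
--
-- 		Aint.append(aint)
-- 		Afrac.append(afrac)
--
-- 	return Aint, Afrac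
-- ===== SOURCE B (Python) =====
-- def partitionmatrix(A, iind):
--     if len(A) == 0:
--         return [], []
--     numcol = len(A[0])
--     intcols = [j for j in range(numcol) if j in iind]
--     fraccols = [j for j in range(numcol) if j not in iind]
--     Aint = [[A[i][j] for j in intcols] for i in range(len(A))]
--     Afrac = [[A[i][j] for j in fraccols] for i in range(len(A))]
--     return Aint, Afrac
-- ===== Notes on version B (the rewrite author's own statement) =====
-- stated objective: alternative
-- what changed: Replaces the branch-inside-nested-loop accumulator with a two-phase shape: one pass over column indices builds the integer/fractional index tables, then each row is produced by gathering along those precomputed tables (membership tested once per column instead of once per cell).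
import Mathlib
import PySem

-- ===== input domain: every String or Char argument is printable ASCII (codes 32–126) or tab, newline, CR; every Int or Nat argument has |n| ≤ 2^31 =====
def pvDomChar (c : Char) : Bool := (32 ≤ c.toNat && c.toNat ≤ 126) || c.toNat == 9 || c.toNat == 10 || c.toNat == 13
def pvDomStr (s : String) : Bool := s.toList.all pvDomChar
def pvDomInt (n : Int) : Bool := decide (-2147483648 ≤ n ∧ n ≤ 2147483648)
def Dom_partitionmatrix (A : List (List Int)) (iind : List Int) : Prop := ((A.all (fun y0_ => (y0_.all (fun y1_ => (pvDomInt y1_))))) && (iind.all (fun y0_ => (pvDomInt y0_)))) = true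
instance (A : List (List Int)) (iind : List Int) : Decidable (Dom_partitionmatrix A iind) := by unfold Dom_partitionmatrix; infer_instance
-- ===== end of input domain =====

-- B builds the integer/fractional column-index tables in one pass and then gathers
-- each row along them; same return value as A on all inputs where A returns (alternative decomposition).

-- shared element access A[i][j] (exact where both indices are in range; Pre_ guarantees that)
def pvAt (A : List (List Int)) (i j : Int) : Int :=
  PySem.List.pyGetD ((PySem.List.pyGet? A i).getD []) j 0

-- ===== PORT A =====
def partitionmatrix (A : List (List Int)) (iind : List Int) : List (List Int) × List (List Int) :=
  if A.length = 0 then ([], []) else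
    let numrow : Int := A.length
    let numcol : Int := (A.headD []).length
    (PySem.List.pyRange 0 numrow 1).foldl
      (fun (acc : List (List Int) × List (List Int)) i =>
        let r := (PySem.List.pyRange 0 numcol 1).foldl
          (fun (r : List Int × List Int) j =>
            if j ∈ iind then (r.1 ++ [pvAt A i j], r.2) else (r.1, r.2 ++ [pvAt A i j]))
          ([], [])
        (acc.1 ++ [r.1], acc.2 ++ [r.2]))
      ([], [])

-- ===== PORT B =====
def partitionmatrix_alt (A : List (List Int)) (iind : List Int) : List (List Int) × List (List Int) :=
  if A.length = 0 then ([], []) else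
    let numcol : Int := (A.headD []).length
    let intcols := (PySem.List.pyRange 0 numcol 1).filter (fun j => decide (j ∈ iind))
    let fraccols := (PySem.List.pyRange 0 numcol 1).filter (fun j => decide (j ∉ iind))
    let rows := PySem.List.pyRange 0 (A.length : Int) 1
    (rows.map (fun i => intcols.map (fun j => pvAt A i j)),
     rows.map (fun i => fraccols.map (fun j => pvAt A i j)))

-- ===== PRECONDITION & SPEC =====
-- Pre_ excludes exactly the inputs where Python's A[i][j] raises IndexError:
-- some row shorter than len(A[0]).
def Pre_partitionmatrix (A : List (List Int)) (iind : List Int) : Prop :=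
  ∀ r ∈ A, (A.headD []).length ≤ r.length
instance (A : List (List Int)) (iind : List Int) : Decidable (Pre_partitionmatrix A iind) := by
  unfold Pre_partitionmatrix; infer_instance

def pvWitness_partitionmatrix : List (List Int) × List Int := ([[1, 2, 3], [4, 5, 6]], [0, 2])

def Spec_partitionmatrix (A : List (List Int)) (iind : List Int) (out : List (List Int) × List (List Int)) : Prop := out = partitionmatrix_alt A iind
instance (A : List (List Int)) (iind : List Int) (out : List (List Int) × List (List Int)) : Decidable (Spec_partitionmatrix A iind out) := by unfold Spec_partitionmatrix; infer_instance

-- ===== CLAIM (what is proved, stated in full; the proofs are below) =====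
def Claim_equal_partitionmatrix : Prop := ∀ (A : List (List Int)) (iind : List Int), Dom_partitionmatrix A iind → Pre_partitionmatrix A iind → Spec_partitionmatrix A iind (partitionmatrix A iind)

-- ===== LEMMAS AND PROOFS =====

-- A's inner branch-loop over the column indices equals filtering the indices then mapping the access
theorem pv_inner (js : List Int) (iind : List Int) (f : Int → Int) (a b : List Int) :
    js.foldl
      (fun (r : List Int × List Int) j =>
        if j ∈ iind then (r.1 ++ [f j], r.2) else (r.1, r.2 ++ [f j]))
      (a, b)
    = (a ++ (js.filter (fun j => decide (j ∈ iind))).map f,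
       b ++ (js.filter (fun j => decide (j ∉ iind))).map f) := by
  induction js generalizing a b with
  | nil => simp
  | cons x xs ih =>
    by_cases hx : x ∈ iind <;> simp [List.foldl, List.filter, hx, ih]

-- A's outer append-accumulator loop over the row indices equals mapping the row builders
theorem pv_outer (is : List Int) (g h : Int → List Int) (a b : List (List Int)) :
    is.foldl
      (fun (acc : List (List Int) × List (List Int)) i => (acc.1 ++ [g i], acc.2 ++ [h i]))
      (a, b)
    = (a ++ is.map g, b ++ is.map h) := by
  induction is generalizing a b with
  | nil => simp
  | cons x xs ih => simp [List.foldl, ih]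

-- ===== VERDICT (by name: the statement is the Claim_ definition above) =====
theorem partitionmatrix_spec : Claim_equal_partitionmatrix := by
  intro A iind _ _
  unfold Spec_partitionmatrix partitionmatrix partitionmatrix_alt
  by_cases h : A.length = 0
  · simp [h]
  · simp only [h, if_false]
    rw [show (([], []) : List Int × List Int) = (([] : List Int), ([] : List Int)) from rfl]
    simp only [pv_inner, pv_outer]
    simp
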